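-- pv_equiv track=rewrite | github.com/alanzhuk/ScoutDoc-Maker | Scout 2.py | report_seperate_aff
-- ===== SOURCE A (Python) =====
-- def report_seperate_aff(string): #takes the round reports and makes them digestible.
--     start = 0
--     progress = 0
--     e = 0
--     for i in string:
--         if i == "1" and progress == 0:
--             progress = 1
--             start = e
--         elif i == "a" and progress == 1:
--             progress = 2
--         elif i == "c" and progress == 2:
--             break
--         else:
--             progress = 0
--         e += 1
--     progress = 0
--     e = 0
--     end = 0
--     for i in string:
--         if i == "1" and progress == 0:
--             progress = 1
--             end = e
--         elif i == "n" and progress == 1: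
--             progress = 2
--         elif i == "c" and progress == 2:
--             break
--         else:
--             progress = 0
--         e += 1
--     return(string[start:end])
-- ===== SOURCE B (Python) =====
-- def report_seperate_aff(string):  # single pass: run the "1ac" and "1nc" automata together
--     pa = pn = 0
--     locked_a = locked_n = False
--     start = end = 0
--     e = 0
--     for ch in string:
--         if not locked_a:
--             if ch == "1" and pa == 0:
--                 pa = 1
--                 start = e
--             elif ch == "a" and pa == 1:
--                 pa = 2
--             elif ch == "c" and pa == 2:
--                 locked_a = True
--             else:
--                 pa = 0
--         if not locked_n:
--             if ch == "1" and pn == 0: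
--                 pn = 1
--                 end = e
--             elif ch == "n" and pn == 1:
--                 pn = 2
--             elif ch == "c" and pn == 2:
--                 locked_n = True
--             else:
--                 pn = 0
--         e += 1
--     return string[start:end]
-- ===== Notes on version B (the rewrite author's own statement) =====
-- stated objective: alternative
-- what changed: B replaces A's two separate scans of the string (one per marker automaton) with a single pass that runs both automata simultaneously, locking each once it completes.
import Mathlib
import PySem

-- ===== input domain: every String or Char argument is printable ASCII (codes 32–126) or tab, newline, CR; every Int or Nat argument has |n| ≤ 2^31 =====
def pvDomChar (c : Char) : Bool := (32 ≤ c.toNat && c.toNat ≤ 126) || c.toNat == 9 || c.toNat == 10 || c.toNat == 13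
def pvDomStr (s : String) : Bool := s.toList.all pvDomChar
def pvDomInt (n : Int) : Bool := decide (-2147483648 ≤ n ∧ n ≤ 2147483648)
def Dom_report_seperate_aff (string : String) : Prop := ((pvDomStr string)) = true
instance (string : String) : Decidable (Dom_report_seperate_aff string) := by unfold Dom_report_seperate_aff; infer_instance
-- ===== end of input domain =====

-- B runs A's two marker automata ("1ac" start-finder, "1nc" end-finder) in ONE pass over the
-- string instead of A's two passes; equivalence of the return value is proved on all inputs.


-- ===== PORT A =====
-- first loop of A: returns final `start` (break at 'c' in progress 2 returns immediately)
def pvALoopA (l : List Char) (start progress e : Int) : Int :=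
  match l with
  | [] => start
  | i :: rest =>
    if i = '1' ∧ progress = 0 then pvALoopA rest e 1 (e + 1)
    else if i = 'a' ∧ progress = 1 then pvALoopA rest start 2 (e + 1)
    else if i = 'c' ∧ progress = 2 then start
    else pvALoopA rest start 0 (e + 1)

-- second loop of A: returns final `end`
def pvALoopN (l : List Char) (endv progress e : Int) : Int :=
  match l with
  | [] => endv
  | i :: rest =>
    if i = '1' ∧ progress = 0 then pvALoopN rest e 1 (e + 1)
    else if i = 'n' ∧ progress = 1 then pvALoopN rest endv 2 (e + 1)
    else if i = 'c' ∧ progress = 2 then endv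
    else pvALoopN rest endv 0 (e + 1)

def report_seperate_aff (string : String) : String :=
  let start := pvALoopA string.toList 0 0 0
  let endv := pvALoopN string.toList 0 0 0
  String.ofList (PySem.List.slice string.toList (some start) (some endv))

-- ===== PORT B =====
-- one step of the a-machine: state (pa, start, locked_a)
def pvStepA (ch : Char) (pa start : Int) (la : Bool) (e : Int) : Int × Int × Bool :=
  if la then (pa, start, la)
  else if ch = '1' ∧ pa = 0 then (1, e, false)
  else if ch = 'a' ∧ pa = 1 then (2, start, false)
  else if ch = 'c' ∧ pa = 2 then (pa, start, true)
  else (0, start, false)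

-- one step of the n-machine: state (pn, end, locked_n)
def pvStepN (ch : Char) (pn endv : Int) (ln : Bool) (e : Int) : Int × Int × Bool :=
  if ln then (pn, endv, ln)
  else if ch = '1' ∧ pn = 0 then (1, e, false)
  else if ch = 'n' ∧ pn = 1 then (2, endv, false)
  else if ch = 'c' ∧ pn = 2 then (pn, endv, true)
  else (0, endv, false)

-- B's single loop over the characters, carrying both machines at once
def pvBLoop (l : List Char) (pa start : Int) (la : Bool) (pn endv : Int) (ln : Bool) (e : Int) :
    Int × Int :=
  match l with
  | [] => (start, endv)
  | ch :: rest =>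
    let a := pvStepA ch pa start la e
    let n := pvStepN ch pn endv ln e
    pvBLoop rest a.1 a.2.1 a.2.2 n.1 n.2.1 n.2.2 (e + 1)

def report_seperate_aff_alt (string : String) : String :=
  let r := pvBLoop string.toList 0 0 false 0 0 false 0
  String.ofList (PySem.List.slice string.toList (some r.1) (some r.2))

-- ===== PRECONDITION & SPEC =====
def Spec_report_seperate_aff (string : String) (out : String) : Prop := out = report_seperate_aff_alt string
instance (string : String) (out : String) : Decidable (Spec_report_seperate_aff string out) := by unfold Spec_report_seperate_aff; infer_instance

-- ===== CLAIM (what is proved, stated in full; the proofs are below) =====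
def Claim_equal_report_seperate_aff : Prop := ∀ (string : String), Dom_report_seperate_aff string → Spec_report_seperate_aff string (report_seperate_aff string)

-- ===== LEMMAS AND PROOFS =====

-- projection of B's loop onto the a-machine alone
def pvAPart (l : List Char) (pa start : Int) (la : Bool) (e : Int) : Int :=
  match l with
  | [] => start
  | ch :: rest =>
    let a := pvStepA ch pa start la e
    pvAPart rest a.1 a.2.1 a.2.2 (e + 1)

-- projection of B's loop onto the n-machine alone
def pvNPart (l : List Char) (pn endv : Int) (ln : Bool) (e : Int) : Int :=
  match l with
  | [] => endv
  | ch :: rest =>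
    let n := pvStepN ch pn endv ln e
    pvNPart rest n.1 n.2.1 n.2.2 (e + 1)

-- the two machines in B's combined loop evolve independently
theorem pvBLoop_pair (l : List Char) : ∀ (pa start : Int) (la : Bool) (pn endv : Int) (ln : Bool)
    (e : Int),
    pvBLoop l pa start la pn endv ln e = (pvAPart l pa start la e, pvNPart l pn endv ln e) := by
  induction l with
  | nil => intro pa start la pn endv ln e; rfl
  | cons ch rest ih => intro pa start la pn endv ln e; simp only [pvBLoop, pvAPart, pvNPart, ih]

-- B's a-machine (locked ⇒ frozen) agrees with A's first loop
theorem pvAPart_eq (l : List Char) : ∀ (pa start : Int) (la : Bool) (e : Int),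
    pvAPart l pa start la e = if la then start else pvALoopA l start pa e := by
  induction l with
  | nil => intro pa start la e; cases la <;> simp [pvAPart, pvALoopA]
  | cons ch rest ih =>
    intro pa start la e
    cases la with
    | true => simp [pvAPart, pvStepA, ih]
    | false =>
      simp only [pvAPart, pvStepA, pvALoopA, Bool.false_eq_true, if_false]
      split_ifs <;> simp [ih]

-- B's n-machine agrees with A's second loop
theorem pvNPart_eq (l : List Char) : ∀ (pn endv : Int) (ln : Bool) (e : Int),
    pvNPart l pn endv ln e = if ln then endv else pvALoopN l endv pn e := by
  induction l with
  | nil => intro pn endv ln e; cases ln <;> simp [pvNPart, pvALoopN]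
  | cons ch rest ih =>
    intro pn endv ln e
    cases ln with
    | true => simp [pvNPart, pvStepN, ih]
    | false =>
      simp only [pvNPart, pvStepN, pvALoopN, Bool.false_eq_true, if_false]
      split_ifs <;> simp [ih]

-- ===== VERDICT (by name: the statement is the Claim_ definition above) =====
theorem report_seperate_aff_spec : Claim_equal_report_seperate_aff := by
  intro s _
  unfold Spec_report_seperate_aff report_seperate_aff report_seperate_aff_alt
  simp [pvBLoop_pair, pvAPart_eq, pvNPart_eq]
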